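-- pv_equiv track=rewrite | github.com/AlexLee2014/ISC_32A_labproj1 | lab projects/proj_1/__init__.py | lexicographical_sort
-- ===== SOURCE A (Python) =====
-- def lexicographical_sort(directory : str, inputfiles : []) -> []:
--     outputfiles = []
--     directfiles = []
--     subfiles = []
--     for file in inputfiles:
--         if "\\" in file[directory.__len__()+1:]:
--             subfiles.append(file)
--         else:
--             directfiles.append(file)
--     outputfiles.extend(sorted(directfiles, key=lambda str:str.lower()))
--     outputfiles.extend(sorted(subfiles, key=lambda str:str.lower()))
--     return outputfiles
-- ===== SOURCE B (Python) =====
-- def lexicographical_sort(directory: str, inputfiles: list) -> list: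
--     cut = len(directory) + 1
--     return sorted(inputfiles, key=lambda f: ("\\" in f[cut:], f.lower()))
-- ===== Notes on version B (the rewrite author's own statement) =====
-- stated objective: simpler
-- what changed: Replaces the partition-into-two-lists-then-sort-each-then-concatenate structure with a single stable sorted() call on a composite key (is-subfile bool, lowercased name), relying on False<True and sort stability.
import Mathlib
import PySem

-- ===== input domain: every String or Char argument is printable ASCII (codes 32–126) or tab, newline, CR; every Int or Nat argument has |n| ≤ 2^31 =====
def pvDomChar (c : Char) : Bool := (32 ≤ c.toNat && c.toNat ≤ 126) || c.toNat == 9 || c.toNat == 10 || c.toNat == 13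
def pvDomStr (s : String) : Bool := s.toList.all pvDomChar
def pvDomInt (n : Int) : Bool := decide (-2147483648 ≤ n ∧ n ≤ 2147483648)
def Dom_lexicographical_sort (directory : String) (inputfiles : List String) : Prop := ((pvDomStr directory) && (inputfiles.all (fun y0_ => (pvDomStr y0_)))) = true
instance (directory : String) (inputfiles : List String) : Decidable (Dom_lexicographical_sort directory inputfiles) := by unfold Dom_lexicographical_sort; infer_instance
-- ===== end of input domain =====

-- B replaces A's partition-then-sort-twice by one stable sort on the composite key
-- (is-subfile, lowercased name); objective: simpler.

-- ===== PORT A =====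
-- "\\" in file[len(directory)+1:]
def lsIsSub (directory : String) (file : String) : Bool :=
  PySem.Str.isIn "\\" (PySem.Str.slice file (some ((PySem.Str.len directory) + 1)) none)

def lexicographical_sort (directory : String) (inputfiles : List String) : List String :=
  let st := inputfiles.foldl
    (fun (p : List String × List String) file =>
      if lsIsSub directory file then (p.1, p.2 ++ [file]) else (p.1 ++ [file], p.2))
    ([], [])
  let outputfiles : List String := []
  let outputfiles := outputfiles ++ PySem.List.sorted st.1 (fun s => PySem.Str.lower s) false
  let outputfiles := outputfiles ++ PySem.List.sorted st.2 (fun s => PySem.Str.lower s) false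
  outputfiles

-- ===== PORT B =====
def lexicographical_sort_alt (directory : String) (inputfiles : List String) : List String :=
  let cut : Int := (PySem.Str.len directory) + 1
  PySem.List.sorted2 inputfiles
    (fun f => PySem.Str.isIn "\\" (PySem.Str.slice f (some cut) none))
    (fun f => PySem.Str.lower f) false

-- ===== PRECONDITION & SPEC =====
def Spec_lexicographical_sort (directory : String) (inputfiles : List String) (out : List String) : Prop := out = lexicographical_sort_alt directory inputfiles
instance (directory : String) (inputfiles : List String) (out : List String) : Decidable (Spec_lexicographical_sort directory inputfiles out) := by unfold Spec_lexicographical_sort; infer_instance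

-- ===== CLAIM (what is proved, stated in full; the proofs are below) =====
def Claim_equal_lexicographical_sort : Prop := ∀ (directory : String) (inputfiles : List String), Dom_lexicographical_sort directory inputfiles → Spec_lexicographical_sort directory inputfiles (lexicographical_sort directory inputfiles)

-- ===== LEMMAS AND PROOFS =====

-- inserting with the composite-key comparison into a (false-block ++ true-block) list
theorem insertBy_two {α κ : Type} [LT κ] [DecidableLT κ] (p : α → Bool) (k : α → κ)
    (x : α) (l r : List α) (hl : ∀ y ∈ l, p y = false) (hr : ∀ y ∈ r, p y = true) :
    PySem.List.insertBy
      (fun a b => decide (p a < p b) || (!decide (p b < p a) && decide (k a < k b))) x (l ++ r)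
    = if p x
      then l ++ PySem.List.insertBy (fun a b => decide (k a < k b)) x r
      else PySem.List.insertBy (fun a b => decide (k a < k b)) x l ++ r := by
  induction l with
  | nil =>
    simp only [List.nil_append]
    by_cases hx : p x = true
    · simp only [hx]
      induction r with
      | nil => simp [PySem.List.insertBy]
      | cons z zs ih =>
        have hz := hr z (by simp)
        have hzs : ∀ y ∈ zs, p y = true := fun y hy => hr y (by simp [hy])
        have hc : (decide (p x < p z) || (!decide (p z < p x) && decide (k x < k z)))
            = decide (k x < k z) := by simp [hx, hz]
        simp only [PySem.List.insertBy, hc]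
        by_cases hk : k x < k z
        · simp [hk]
        · simp only [hk, decide_false, Bool.false_eq_true, if_false]
          rw [ih hzs]
          simp
    · have hx' : p x = false := by simpa using hx
      simp only [hx', Bool.false_eq_true, if_false]
      cases r with
      | nil => simp [PySem.List.insertBy]
      | cons z zs =>
        have hz := hr z (by simp)
        have hc : (decide (p x < p z) || (!decide (p z < p x) && decide (k x < k z)))
            = true := by simp [hx', hz]
        simp [PySem.List.insertBy, hc]
  | cons z zs ih =>
    have hz := hl z (by simp)
    have hzs : ∀ y ∈ zs, p y = false := fun y hy => hl y (by simp [hy])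
    by_cases hx : p x = true
    · have hc : (decide (p x < p z) || (!decide (p z < p x) && decide (k x < k z)))
          = false := by simp [hx, hz]
      simp only [List.cons_append, PySem.List.insertBy, hc, Bool.false_eq_true, if_false]
      rw [ih hzs]
      simp [hx]
    · have hx' : p x = false := by simpa using hx
      simp only [List.cons_append, PySem.List.insertBy, hx', Bool.false_eq_true, if_false]
      by_cases hk : k x < k z
      · simp [hk, hz]
      · simp only [hk, decide_false, Bool.false_eq_true, if_false]
        rw [ih hzs]
        simp only [hx', Bool.false_eq_true, if_false, List.cons_append]
        simp [hz]

-- the whole insertion-sort fold splits into two folds over the two filters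
theorem foldl_insertBy_two {α κ : Type} [LT κ] [DecidableLT κ] (p : α → Bool) (k : α → κ) :
    ∀ (xs l r : List α), (∀ y ∈ l, p y = false) → (∀ y ∈ r, p y = true) →
    xs.foldl (fun acc x => PySem.List.insertBy
        (fun a b => decide (p a < p b) || (!decide (p b < p a) && decide (k a < k b))) x acc) (l ++ r)
    = (xs.filter (fun x => !p x)).foldl
        (fun acc x => PySem.List.insertBy (fun a b => decide (k a < k b)) x acc) l
      ++ (xs.filter p).foldl
        (fun acc x => PySem.List.insertBy (fun a b => decide (k a < k b)) x acc) r := by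
  intro xs
  induction xs with
  | nil => intro l r _ _; simp
  | cons x xs ih =>
    intro l r hl hr
    by_cases hx : p x = true
    · simp only [List.foldl_cons, List.filter_cons, hx, Bool.not_true]
      rw [insertBy_two p k x l r hl hr, if_pos hx]
      rw [ih l _ hl (fun y hy => by
        rcases (PySem.List.mem_insertBy _ x y r).1 hy with h | h
        · subst h; exact hx
        · exact hr y h)]
      simp
    · have hx' : p x = false := by simpa using hx
      simp only [List.foldl_cons, List.filter_cons, hx', Bool.not_false]
      rw [insertBy_two p k x l r hl hr, if_neg (by simp [hx'])]
      rw [ih _ r (fun y hy => by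
        rcases (PySem.List.mem_insertBy _ x y l).1 hy with h | h
        · subst h; exact hx'
        · exact hl y h) hr]
      simp

theorem sorted2_eq_append {α κ : Type} [LT κ] [DecidableLT κ] (p : α → Bool) (k : α → κ)
    (xs : List α) :
    PySem.List.sorted2 xs p k false
    = PySem.List.sorted (xs.filter (fun x => !p x)) k false
      ++ PySem.List.sorted (xs.filter p) k false := by
  rw [PySem.List.sorted_eq_foldl_insertBy, PySem.List.sorted_eq_foldl_insertBy]
  have := foldl_insertBy_two p k xs [] [] (by simp) (by simp)
  simpa [PySem.List.sorted2] using this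

-- A's accumulating partition is the pair of filters
theorem partition_foldl (q : String → Bool) :
    ∀ (xs l r : List String),
    xs.foldl (fun (p : List String × List String) file =>
        if q file then (p.1, p.2 ++ [file]) else (p.1 ++ [file], p.2)) (l, r)
    = (l ++ xs.filter (fun f => !q f), r ++ xs.filter q) := by
  intro xs
  induction xs with
  | nil => intro l r; simp
  | cons x xs ih =>
    intro l r
    by_cases hx : q x = true
    · simp [List.foldl_cons, hx, ih]
    · have hx' : q x = false := by simpa using hx
      simp [List.foldl_cons, hx', ih]

-- ===== VERDICT (by name: the statement is the Claim_ definition above) =====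
theorem lexicographical_sort_spec : Claim_equal_lexicographical_sort := by
  intro directory inputfiles _
  unfold Spec_lexicographical_sort lexicographical_sort lexicographical_sort_alt
  rw [partition_foldl (lsIsSub directory) inputfiles [] []]
  rw [sorted2_eq_append (fun f => PySem.Str.isIn "\\"
        (PySem.Str.slice f (some ((PySem.Str.len directory) + 1)) none))
      (fun f => PySem.Str.lower f) inputfiles]
  simp only [List.nil_append]
  rfl
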